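-- pv_equiv track=rewrite | github.com/CDL-Project-Euler/solutions | problem_0011/inle_11.py | prod_downdiag_lines
-- ===== SOURCE A (Python) =====
-- def prod_downdiag_lines(grid: list, line_size: int):
--     height = len(grid)
--     width = len(grid[1])
--     max_sum = 1
--
--     for indexy in range(height - line_size + 1):
--         for indexx in range(width-line_size + 1):
--             current = 1
--             for y in range(line_size):
--                 current *= grid[indexy+ y][indexx + y]
--             max_sum = max(max_sum, current)
--     return max_sum
-- ===== SOURCE B (Python) =====
-- def prod_downdiag_lines(grid: list, line_size: int):
--     # Diagonal decomposition: collect each down-right diagonal once, then slide a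
--     # window of length line_size along it, tracking the running maximum (seeded at 1).
--     height = len(grid)
--     width = len(grid[1])
--     diagonals = []
--     for r in range(height):
--         diagonals.append([grid[r + t][t] for t in range(min(height - r, width))])
--     for c in range(1, width):
--         diagonals.append([grid[t][c + t] for t in range(min(height, width - c))])
--     best = 1
--     for diag in diagonals:
--         for k in range(len(diag) - line_size + 1):
--             p = 1
--             for j in range(line_size):
--                 p *= diag[k + j]
--             best = max(best, p)
--     return best
-- ===== Notes on version B (the rewrite author's own statement) =====
-- stated objective: alternative
-- what changed: A scans every start cell row-major and re-walks the diagonal from each; B first materialises each down-right diagonal once and then slides a length-line_size product window along every diagonal, taking the running maximum.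
-- outside the precondition, e.g. on prod_downdiag_lines([[1], [1, 2]], 2): A returns 2, B raises IndexError
import Mathlib
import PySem

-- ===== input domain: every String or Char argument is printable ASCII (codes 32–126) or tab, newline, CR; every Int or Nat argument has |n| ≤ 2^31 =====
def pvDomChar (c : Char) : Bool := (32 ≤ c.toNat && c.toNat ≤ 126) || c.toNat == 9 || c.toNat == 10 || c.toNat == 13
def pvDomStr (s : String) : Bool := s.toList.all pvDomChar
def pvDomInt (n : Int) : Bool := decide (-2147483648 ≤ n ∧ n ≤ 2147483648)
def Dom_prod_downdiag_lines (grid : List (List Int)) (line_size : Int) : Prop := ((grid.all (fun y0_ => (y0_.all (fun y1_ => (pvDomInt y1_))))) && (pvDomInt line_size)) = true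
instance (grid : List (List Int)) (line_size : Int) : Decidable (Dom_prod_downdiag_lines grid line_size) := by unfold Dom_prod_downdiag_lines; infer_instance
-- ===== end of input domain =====

-- B replaces A's row-major scan over all start cells by building each down-right
-- diagonal once and sliding a product window along it (objective: alternative
-- decomposition, same cost).

-- ===== PORT A =====
def prod_downdiag_lines (grid : List (List Int)) (line_size : Int) : Int :=
  let height : Int := grid.length
  let width : Int := ((PySem.List.pyGetD grid 1 ([] : List Int)).length : Int)
  (PySem.List.pyRange 0 (height - line_size + 1)).foldl (fun max_sum indexy =>
    (PySem.List.pyRange 0 (width - line_size + 1)).foldl (fun max_sum indexx =>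
      max max_sum
        ((PySem.List.pyRange 0 line_size).foldl (fun current y =>
          current * PySem.List.pyGetD (PySem.List.pyGetD grid (indexy + y) []) (indexx + y) 0) 1))
      max_sum) 1

-- ===== PORT B =====
def prod_downdiag_lines_alt (grid : List (List Int)) (line_size : Int) : Int :=
  let height : Int := grid.length
  let width : Int := ((PySem.List.pyGetD grid 1 ([] : List Int)).length : Int)
  let diagonals : List (List Int) :=
    ((PySem.List.pyRange 0 height).map (fun r =>
      (PySem.List.pyRange 0 (min (height - r) width)).map (fun t =>
        PySem.List.pyGetD (PySem.List.pyGetD grid (r + t) []) t 0)))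
    ++ ((PySem.List.pyRange 1 width).map (fun c =>
      (PySem.List.pyRange 0 (min height (width - c))).map (fun t =>
        PySem.List.pyGetD (PySem.List.pyGetD grid t []) (c + t) 0)))
  diagonals.foldl (fun best diag =>
    (PySem.List.pyRange 0 ((diag.length : Int) - line_size + 1)).foldl (fun best k =>
      max best
        ((PySem.List.pyRange 0 line_size).foldl (fun p j =>
          p * PySem.List.pyGetD diag (k + j) 0) 1))
      best) 1

-- ===== PRECONDITION & SPEC =====
-- Pre_ excludes grids with fewer than 2 rows (A's len(grid[1]) raises IndexError) and
-- ragged grids with a row shorter than len(grid[1]): there the scan (or B's diagonal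
-- construction) may index past a row's end; on some such inputs A happens to return
-- while B raises, which is why those ragged grids are excluded as a whole.
def Pre_prod_downdiag_lines (grid : List (List Int)) (line_size : Int) : Prop :=
  2 ≤ grid.length ∧ ∀ row ∈ grid, (PySem.List.pyGetD grid 1 ([] : List Int)).length ≤ row.length
instance (grid : List (List Int)) (line_size : Int) : Decidable (Pre_prod_downdiag_lines grid line_size) := by unfold Pre_prod_downdiag_lines; infer_instance

def pvWitness_prod_downdiag_lines : List (List Int) × Int := ([[1, 2], [3, 4]], 2)

def Spec_prod_downdiag_lines (grid : List (List Int)) (line_size : Int) (out : Int) : Prop := out = prod_downdiag_lines_alt grid line_size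
instance (grid : List (List Int)) (line_size : Int) (out : Int) : Decidable (Spec_prod_downdiag_lines grid line_size out) := by unfold Spec_prod_downdiag_lines; infer_instance

-- ===== CLAIM (what is proved, stated in full; the proofs are below) =====
def Claim_equal_prod_downdiag_lines : Prop := ∀ (grid : List (List Int)) (line_size : Int), Dom_prod_downdiag_lines grid line_size → Pre_prod_downdiag_lines grid line_size → Spec_prod_downdiag_lines grid line_size (prod_downdiag_lines grid line_size)

-- ===== LEMMAS AND PROOFS =====

-- one grid cell, totalised the way both ports read it
def pvCell (grid : List (List Int)) (i j : Int) : Int :=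
  PySem.List.pyGetD (PySem.List.pyGetD grid i []) j 0

-- the product of the length-`ls` down-diagonal line starting at cell q
def pvP (grid : List (List Int)) (ls : Int) (q : Int × Int) : Int :=
  (PySem.List.pyRange 0 ls).foldl (fun c y => c * pvCell grid (q.1 + y) (q.2 + y)) 1

-- A's start cells, in A's (row-major) order
def pvLA (H W ls : Int) : List (Int × Int) :=
  (PySem.List.pyRange 0 (H - ls + 1)).flatMap (fun iy =>
    (PySem.List.pyRange 0 (W - ls + 1)).map (fun ix => (iy, ix)))

-- B's start cells, in B's (diagonal-major) order
def pvLB (H W ls : Int) : List (Int × Int) :=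
  ((PySem.List.pyRange 0 H).flatMap (fun r =>
    (PySem.List.pyRange 0 (min (H - r) W - ls + 1)).map (fun k => (r + k, k))))
  ++ ((PySem.List.pyRange 1 W).flatMap (fun c =>
    (PySem.List.pyRange 0 (min H (W - c) - ls + 1)).map (fun k => (k, c + k))))

theorem pvA_flat (grid : List (List Int)) (ls : Int) :
    prod_downdiag_lines grid ls =
      (pvLA (grid.length : Int) ((PySem.List.pyGetD grid 1 ([] : List Int)).length : Int) ls).foldl
        (fun m q => max m (pvP grid ls q)) 1 := by
  simp [prod_downdiag_lines, pvLA, pvP, pvCell, List.foldl_flatMap, List.foldl_map]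

theorem pvB_flat (grid : List (List Int)) (ls : Int) :
    prod_downdiag_lines_alt grid ls =
      (pvLB (grid.length : Int) ((PySem.List.pyGetD grid 1 ([] : List Int)).length : Int) ls).foldl
        (fun m q => max m (pvP grid ls q)) 1 := by
  unfold prod_downdiag_lines_alt pvLB
  simp only [List.foldl_append, List.foldl_flatMap, List.foldl_map]
  set H : Int := (grid.length : Int) with hH
  set W : Int := ((PySem.List.pyGetD grid 1 ([] : List Int)).length : Int) with hW
  have hW0 : 0 ≤ W := by positivity
  have inner :
      ∀ (L : Int) (base : Int × Int → Int × Int) (acc : Int), 0 ≤ L →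
        (∀ x y : Int, base (x + y, x + y) = ((base (x, x)).1 + y, (base (x, x)).2 + y)) →
        (PySem.List.pyRange 0
            ((((PySem.List.pyRange 0 L).map (fun t => pvCell grid ((base (t, t)).1) ((base (t, t)).2))).length : Int) - ls + 1)).foldl
          (fun best k =>
            max best ((PySem.List.pyRange 0 ls).foldl (fun p j =>
              p * PySem.List.pyGetD
                    ((PySem.List.pyRange 0 L).map (fun t => pvCell grid ((base (t, t)).1) ((base (t, t)).2)))
                    (k + j) 0) 1)) acc =
        (PySem.List.pyRange 0 (L - ls + 1)).foldl
          (fun m k => max m (pvP grid ls (base (k, k)))) acc := by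
    intro L base acc hL hbase
    have hlen : ((((PySem.List.pyRange 0 L).map (fun t => pvCell grid ((base (t, t)).1) ((base (t, t)).2))).length : Int)) = L := by
      simp [List.length_map, PySem.List.length_pyRange_one]; omega
    rw [hlen]
    apply PySem.List.foldl_congr_mem
    intro acc' k hk
    rw [PySem.List.mem_pyRange_one] at hk
    congr 1
    apply PySem.List.foldl_congr_mem
    intro p j hj
    rw [PySem.List.mem_pyRange_one] at hj
    rw [PySem.List.pyGetD_map_pyRange_of_nonneg _ _ _ _ (by omega) (by omega), hbase k j]
  have e1 : ∀ acc : Int,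
      (PySem.List.pyRange 0 H).foldl (fun best r =>
        (PySem.List.pyRange 0
            ((((PySem.List.pyRange 0 (min (H - r) W)).map (fun t =>
                PySem.List.pyGetD (PySem.List.pyGetD grid (r + t) []) t 0)).length : Int) - ls + 1)).foldl
          (fun best k =>
            max best ((PySem.List.pyRange 0 ls).foldl (fun p j =>
              p * PySem.List.pyGetD
                    ((PySem.List.pyRange 0 (min (H - r) W)).map (fun t =>
                      PySem.List.pyGetD (PySem.List.pyGetD grid (r + t) []) t 0))
                    (k + j) 0) 1)) best) acc =
      (PySem.List.pyRange 0 H).foldl (fun best r =>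
        (PySem.List.pyRange 0 (min (H - r) W - ls + 1)).foldl
          (fun m k => max m (pvP grid ls (r + k, k))) best) acc := by
    intro acc
    apply PySem.List.foldl_congr_mem
    intro acc' r hr
    rw [PySem.List.mem_pyRange_one] at hr
    have := inner (min (H - r) W) (fun p => (r + p.1, p.2)) acc' (by omega)
      (by intro x y; simp; ring)
    simpa [pvCell] using this
  rw [e1]
  apply PySem.List.foldl_congr_mem
  intro acc c hc
  rw [PySem.List.mem_pyRange_one] at hc
  have hH0 : 0 ≤ H := by positivity
  have := inner (min H (W - c)) (fun p => (p.1, c + p.2)) acc (by omega)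
    (by intro x y; simp; ring)
  simpa [pvCell] using this

theorem pv_foldl_max_ones {α : Type} (l : List α) (g : α → Int) (a : Int)
    (h : ∀ x ∈ l, g x = 1) (ha : 1 ≤ a) :
    l.foldl (fun m x => max m (g x)) a = a := by
  induction l generalizing a with
  | nil => rfl
  | cons x xs ih =>
      have hx : g x = 1 := h x (by simp)
      simp only [List.foldl_cons, hx]
      rw [max_eq_left (by omega)]
      exact ih a (fun y hy => h y (by simp [hy])) ha

theorem pvLA_nodup (H W ls : Int) : (pvLA H W ls).Nodup := by
  unfold pvLA
  rw [List.nodup_flatMap]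
  constructor
  · intro iy _
    exact (PySem.List.nodup_pyRange_one _ _).map (fun a b h => by injection h)
  · refine (PySem.List.pairwise_lt_pyRange_one _ _).imp ?_
    intro a b hab
    intro q hq1 hq2
    simp only [List.mem_map] at hq1 hq2
    obtain ⟨x, -, hx⟩ := hq1
    obtain ⟨y, -, hy⟩ := hq2
    rw [← hx] at hy
    injection hy with h1 h2
    omega

theorem pvLB_nodup (H W ls : Int) : (pvLB H W ls).Nodup := by
  unfold pvLB
  apply List.Nodup.append
  · rw [List.nodup_flatMap]
    constructor
    · intro r _
      exact (PySem.List.nodup_pyRange_one _ _).map (fun a b h => by injection h)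
    · refine (PySem.List.pairwise_lt_pyRange_one _ _).imp ?_
      intro a b hab q hq1 hq2
      simp only [List.mem_map] at hq1 hq2
      obtain ⟨x, -, hx⟩ := hq1
      obtain ⟨y, -, hy⟩ := hq2
      rw [← hx] at hy
      injection hy with h1 h2
      omega
  · rw [List.nodup_flatMap]
    constructor
    · intro c _
      exact (PySem.List.nodup_pyRange_one _ _).map (fun a b h => by injection h)
    · refine (PySem.List.pairwise_lt_pyRange_one _ _).imp ?_
      intro a b hab q hq1 hq2
      simp only [List.mem_map] at hq1 hq2
      obtain ⟨x, -, hx⟩ := hq1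
      obtain ⟨y, -, hy⟩ := hq2
      rw [← hx] at hy
      injection hy with h1 h2
      omega
  · intro q hq1 hq2
    simp only [List.mem_flatMap, List.mem_map, PySem.List.mem_pyRange_one] at hq1 hq2
    obtain ⟨r, hr, k, hk, hq⟩ := hq1
    obtain ⟨c, hc, k', hk', hq'⟩ := hq2
    rw [← hq] at hq'
    injection hq' with h1 h2
    omega

theorem pvPerm (H W ls : Int) (hH : 0 ≤ H) (hW : 0 ≤ W) (hls : 1 ≤ ls) :
    (pvLA H W ls).Perm (pvLB H W ls) := by
  rw [List.perm_ext_iff_of_nodup (pvLA_nodup H W ls) (pvLB_nodup H W ls)]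
  rintro ⟨a, b⟩
  unfold pvLA pvLB
  simp only [List.mem_flatMap, List.mem_map, List.mem_append, PySem.List.mem_pyRange_one,
    Prod.mk.injEq]
  constructor
  · rintro ⟨iy, hiy, ix, hix, rfl, rfl⟩
    by_cases hba : ix ≤ iy
    · exact Or.inl ⟨iy - ix, by omega, ix, by omega, by omega, rfl⟩
    · exact Or.inr ⟨ix - iy, by omega, iy, by omega, rfl, by omega⟩
  · rintro (⟨r, hr, k, hk, rfl, rfl⟩ | ⟨c, hc, k, hk, rfl, rfl⟩)
    · exact ⟨r + k, by omega, k, by omega, rfl, rfl⟩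
    · exact ⟨k, by omega, c + k, by omega, rfl, rfl⟩

-- ===== VERDICT (by name: the statement is the Claim_ definition above) =====
theorem prod_downdiag_lines_spec : Claim_equal_prod_downdiag_lines := by
  intro grid ls _ _
  unfold Spec_prod_downdiag_lines
  rw [pvA_flat, pvB_flat]
  by_cases hls : 1 ≤ ls
  · have hmap : ∀ l : List (Int × Int),
        l.foldl (fun m q => max m (pvP grid ls q)) 1 = (l.map (pvP grid ls)).foldl max 1 :=
      fun l => (List.foldl_map (f := pvP grid ls) (g := max) (l := l) (init := 1)).symm
    rw [hmap, hmap]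
    exact (((pvPerm _ _ ls (by positivity) (by positivity) hls).map (pvP grid ls)).foldl_eq 1)
  · have hone : ∀ q, pvP grid ls q = 1 := by
      intro q
      unfold pvP
      rw [PySem.List.pyRange_one_eq_nil (by omega)]
      rfl
    rw [pv_foldl_max_ones _ _ 1 (fun q _ => hone q) le_rfl,
        pv_foldl_max_ones _ _ 1 (fun q _ => hone q) le_rfl]
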